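-- pv_equiv track=rewrite | github.com/microsoft/ARXGEN | arxiv/simpleDelatex.py | removeBadMath
-- ===== SOURCE A (Python) =====
-- def removeBadMath(content):
--     result = []
--     pos = 0
--     while pos < len(content) - 1:
--         if content[pos:pos+2] == '\\(':
--             if not (pos > 0 and content[pos-1] == '\\'):
--                 result.append(' $ ')
--                 pos += 2
--                 continue
--
--         if content[pos:pos+2] == '\\)':
--             if not (pos > 0 and content[pos-1] == '\\'):
--                 result.append(' $ ')
--                 pos += 2
--                 continue
--
--         if content[pos:pos+2] == '\\[':
--             if not (pos > 0 and content[pos-1] == '\\'):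
--                 result.append(' $$ ')
--                 pos += 2
--                 continue
--
--         if content[pos:pos+2] == '\\]':
--             if not (pos > 0 and content[pos-1] == '\\'):
--                 result.append(' $$ ')
--                 pos += 2
--                 continue
--         result.append(content[pos])
--         pos += 1
--     if pos < len(content):
--         result.append(content[pos])
--     return ''.join(result)
-- ===== SOURCE B (Python) =====
-- def removeBadMath(content):
--     # One-pass state machine: buffer an unescaped backslash and decide on the
--     # next character, instead of cursor arithmetic with 2-char slices.
--     out = []
--     pending = False   # an unescaped backslash is buffered, not yet emitted
--     prev_bs = False   # the previous emitted original character was a backslash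
--     for c in content:
--         if pending:
--             pending = False
--             if c == '(' or c == ')':
--                 out.append(' $ ')
--                 prev_bs = False
--             elif c == '[' or c == ']':
--                 out.append(' $$ ')
--                 prev_bs = False
--             elif c == '\\':
--                 out.append('\\\\')
--                 prev_bs = True
--             else:
--                 out.append('\\' + c)
--                 prev_bs = False
--         elif c == '\\' and not prev_bs:
--             pending = True
--         else:
--             out.append(c)
--             prev_bs = (c == '\\')
--     if pending:
--         out.append('\\')
--     return ''.join(out)
-- ===== Notes on version B (the rewrite author's own statement) =====
-- stated objective: faster
-- what changed: Replaced the cursor loop with 2-char slices and pos-1 lookbehind by a single forward-pass state machine that buffers an unescaped backslash and decides on the next character; no slicing or index arithmetic.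
import Mathlib
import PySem

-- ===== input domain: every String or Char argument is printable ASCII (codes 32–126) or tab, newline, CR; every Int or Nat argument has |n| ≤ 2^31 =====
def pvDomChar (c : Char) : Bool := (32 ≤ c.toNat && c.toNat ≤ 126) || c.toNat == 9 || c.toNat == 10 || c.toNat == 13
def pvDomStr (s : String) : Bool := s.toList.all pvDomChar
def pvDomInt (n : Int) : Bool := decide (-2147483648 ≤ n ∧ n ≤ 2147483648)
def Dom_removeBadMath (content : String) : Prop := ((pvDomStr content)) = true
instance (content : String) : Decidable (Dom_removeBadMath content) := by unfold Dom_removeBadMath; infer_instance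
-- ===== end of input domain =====

-- B replaces A's cursor/slice loop by a one-pass state machine (same output, same cost).

-- ===== PORT A =====
-- A's while-loop as recursion on the cursor `pos` (a Nat: Python's pos starts at 0 and
-- only grows). `content[pos:pos+2]` is the exact slice `(cs.drop pos).take 2`;
-- `content[pos]` / `content[pos-1]` are in range wherever A reads them, so getD is exact.
-- The post-loop tail append ('if pos < len(content): …') is the else-branch.
def removeBadMathGo (cs : List Char) (pos : Nat) (acc : List Char) : List Char :=
  if _h : pos < cs.length - 1 then
    let two := (cs.drop pos).take 2
    let escaped := decide (0 < pos) && (cs.getD (pos - 1) ' ' == '\\')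
    if two = ['\\', '('] && !escaped then
      removeBadMathGo cs (pos + 2) (acc ++ (' ' :: '$' :: ' ' :: []))
    else if two = ['\\', ')'] && !escaped then
      removeBadMathGo cs (pos + 2) (acc ++ (' ' :: '$' :: ' ' :: []))
    else if two = ['\\', '['] && !escaped then
      removeBadMathGo cs (pos + 2) (acc ++ (' ' :: '$' :: '$' :: ' ' :: []))
    else if two = ['\\', ']'] && !escaped then
      removeBadMathGo cs (pos + 2) (acc ++ (' ' :: '$' :: '$' :: ' ' :: []))
    else
      removeBadMathGo cs (pos + 1) (acc ++ [cs.getD pos ' '])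
  else
    if pos < cs.length then acc ++ [cs.getD pos ' '] else acc
termination_by cs.length - pos
decreasing_by all_goals omega

def removeBadMath (content : String) : String :=
  String.ofList (removeBadMathGo content.toList 0 [])

-- ===== PORT B =====
-- B's for-loop over the characters with state (pending, prev_bs); the trailing
-- 'if pending: append backslash' is the [] case.
def removeBadMathAltGo (cs : List Char) (pending prevBs : Bool) (acc : List Char) : List Char :=
  match cs with
  | [] => if pending then acc ++ ['\\'] else acc
  | c :: rest =>
    if pending then
      if c = '(' ∨ c = ')' then
        removeBadMathAltGo rest false false (acc ++ (' ' :: '$' :: ' ' :: []))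
      else if c = '[' ∨ c = ']' then
        removeBadMathAltGo rest false false (acc ++ (' ' :: '$' :: '$' :: ' ' :: []))
      else if c = '\\' then
        removeBadMathAltGo rest false true (acc ++ ['\\', '\\'])
      else
        removeBadMathAltGo rest false false (acc ++ ['\\', c])
    else if c = '\\' && !prevBs then
      removeBadMathAltGo rest true prevBs acc
    else
      removeBadMathAltGo rest false (c == '\\') (acc ++ [c])

def removeBadMath_alt (content : String) : String :=
  String.ofList (removeBadMathAltGo content.toList false false [])

-- ===== PRECONDITION & SPEC =====
def Spec_removeBadMath (content : String) (out : String) : Prop := out = removeBadMath_alt content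
instance (content : String) (out : String) : Decidable (Spec_removeBadMath content out) := by unfold Spec_removeBadMath; infer_instance

-- ===== CLAIM (what is proved, stated in full; the proofs are below) =====
def Claim_equal_removeBadMath : Prop := ∀ (content : String), Dom_removeBadMath content → Spec_removeBadMath content (removeBadMath content)

-- ===== LEMMAS AND PROOFS =====

-- Reference scan both ports are reduced to: process the suffix with a one-char
-- lookbehind flag, rewriting an unescaped '\(' '\)' '\[' '\]' pair.
def gScan (prevBs : Bool) : List Char → List Char
  | [] => []
  | [c] => [c]
  | c :: d :: rest =>
    if c = '\\' ∧ prevBs = false then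
      if d = '(' ∨ d = ')' then ' ' :: '$' :: ' ' :: gScan false rest
      else if d = '[' ∨ d = ']' then ' ' :: '$' :: '$' :: ' ' :: gScan false rest
      else c :: gScan true (d :: rest)
    else c :: gScan (c == '\\') (d :: rest)
termination_by cs => cs.length

@[simp] lemma gScan_nil (b : Bool) : gScan b [] = [] := by rw [gScan]
@[simp] lemma gScan_one (b : Bool) (c : Char) : gScan b [c] = [c] := by rw [gScan]
lemma gScan_two (b : Bool) (c d : Char) (rest : List Char) :
    gScan b (c :: d :: rest) =
      if c = '\\' ∧ b = false then
        if d = '(' ∨ d = ')' then ' ' :: '$' :: ' ' :: gScan false rest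
        else if d = '[' ∨ d = ']' then ' ' :: '$' :: '$' :: ' ' :: gScan false rest
        else c :: gScan true (d :: rest)
      else c :: gScan (c == '\\') (d :: rest) := by rw [gScan]

lemma gScan_else (b : Bool) (c : Char) (rest : List Char) (h : ¬ (c = '\\' ∧ b = false)) :
    gScan b (c :: rest) = c :: gScan (c == '\\') rest := by
  cases rest with
  | nil => simp
  | cons d r => rw [gScan_two, if_neg h]

lemma altGo_eq_gScan : ∀ (cs : List Char) (pending prevBs : Bool) (acc : List Char),
    removeBadMathAltGo cs pending prevBs acc =
      acc ++ (if pending then gScan false ('\\' :: cs) else gScan prevBs cs) := by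
  intro cs
  induction cs with
  | nil =>
    intro pending prevBs acc
    cases pending <;> simp [removeBadMathAltGo]
  | cons c rest ih =>
    intro pending prevBs acc
    cases pending with
    | true =>
      simp only [removeBadMathAltGo, if_true]
      rw [gScan_two,
        if_pos (show ('\\' : Char) = '\\' ∧ (false : Bool) = false from ⟨rfl, rfl⟩)]
      by_cases h1 : c = '(' ∨ c = ')'
      · rw [if_pos h1, if_pos h1, ih]
        simp
      · rw [if_neg h1, if_neg h1]
        by_cases h2 : c = '[' ∨ c = ']'
        · rw [if_pos h2, if_pos h2, ih]
          simp
        · rw [if_neg h2, if_neg h2]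
          by_cases h3 : c = '\\'
          · subst h3
            rw [if_pos rfl, ih, gScan_else true '\\' rest (by simp)]
            simp
          · rw [if_neg h3, ih, gScan_else true c rest (by simp)]
            have hcb : (c == '\\') = false := by simp [h3]
            simp [hcb]
    | false =>
      by_cases hbs : c = '\\' ∧ prevBs = false
      · obtain ⟨hc, hp⟩ := hbs
        subst hc hp
        simp [removeBadMathAltGo, ih]
      · have hguard : ¬ ((c = '\\' && !prevBs) = true) := by
          intro h
          simp only [Bool.and_eq_true, decide_eq_true_eq, Bool.not_eq_true'] at h
          exact hbs ⟨h.1, h.2⟩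
        simp only [removeBadMathAltGo]
        rw [if_neg (by simp : ¬ ((false : Bool) = true)), if_neg hguard, ih,
          gScan_else prevBs c rest hbs]
        simp

lemma drop_two (cs : List Char) (pos : Nat) (h : pos + 1 < cs.length) :
    cs.drop pos = cs.getD pos ' ' :: cs.getD (pos + 1) ' ' :: cs.drop (pos + 2) := by
  rw [List.drop_eq_getElem_cons (by omega), List.drop_eq_getElem_cons (by omega)]
  simp [List.getD, h, Nat.lt_of_succ_lt h]

lemma goA_eq_gScan : ∀ (n : Nat) (cs : List Char) (pos : Nat) (acc : List Char)
    (prevBs : Bool), cs.length - pos ≤ n →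
    prevBs = (decide (0 < pos) && (cs.getD (pos - 1) ' ' == '\\')) →
    removeBadMathGo cs pos acc = acc ++ gScan prevBs (cs.drop pos) := by
  intro n
  induction n with
  | zero =>
    intro cs pos acc prevBs hle _
    rw [removeBadMathGo]
    rw [dif_neg (by omega), if_neg (by omega)]
    rw [List.drop_eq_nil_of_le (by omega)]
    simp
  | succ n ih =>
    intro cs pos acc prevBs hle hprev
    rw [removeBadMathGo]
    by_cases hlt : pos < cs.length - 1
    · have h2 : pos + 1 < cs.length := by omega
      rw [dif_pos hlt]
      have hdrop : cs.drop pos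
          = cs.getD pos ' ' :: cs.getD (pos + 1) ' ' :: cs.drop (pos + 2) :=
        drop_two cs pos h2
      have htwo : (cs.drop pos).take 2 = [cs.getD pos ' ', cs.getD (pos + 1) ' '] := by
        rw [hdrop]; rfl
      have hdrop1 : cs.drop (pos + 1) = cs.getD (pos + 1) ' ' :: cs.drop (pos + 2) := by
        rw [List.drop_eq_getElem_cons (by omega)]
        simp [List.getD, h2]
      have hesc : (decide (0 < pos) && (cs.getD (pos - 1) ' ' == '\\')) = prevBs :=
        hprev.symm
      have hne : ∀ d : Char, cs.getD (pos + 1) ' ' ≠ d →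
          ¬ (((cs.drop pos).take 2 = ['\\', d] &&
            !(decide (0 < pos) && (cs.getD (pos - 1) ' ' == '\\'))) = true) := by
        intro d hd hc
        rw [htwo] at hc
        simp only [Bool.and_eq_true, decide_eq_true_eq, List.cons.injEq, and_true] at hc
        exact hd hc.1.2
      conv_rhs => rw [hdrop]
      rw [gScan_two]
      by_cases hA : cs.getD pos ' ' = '\\' ∧ prevBs = false
      · rw [if_pos hA]
        by_cases hb1 : cs.getD (pos + 1) ' ' = '(' ∨ cs.getD (pos + 1) ' ' = ')'
        · rw [if_pos hb1]
          have ihnext := ih cs (pos + 2) (acc ++ (' ' :: '$' :: ' ' :: [])) false (by omega)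
            (by
              show false = (decide (0 < pos + 2) && (cs.getD (pos + 1) ' ' == '\\'))
              rcases hb1 with h | h <;> rw [h] <;> simp)
          rcases hb1 with h | h
          · rw [if_pos (by rw [htwo, hA.1, h, hesc, hA.2]; simp), ihnext]
            simp
          · rw [if_neg (hne '(' (by rw [h]; decide)),
              if_pos (by rw [htwo, hA.1, h, hesc, hA.2]; simp), ihnext]
            simp
        · rw [if_neg hb1]
          by_cases hb2 : cs.getD (pos + 1) ' ' = '[' ∨ cs.getD (pos + 1) ' ' = ']'
          · rw [if_pos hb2]
            have ihnext := ih cs (pos + 2) (acc ++ (' ' :: '$' :: '$' :: ' ' :: [])) false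
              (by omega)
              (by
                show false = (decide (0 < pos + 2) && (cs.getD (pos + 1) ' ' == '\\'))
                rcases hb2 with h | h <;> rw [h] <;> simp)
            rcases hb2 with h | h
            · rw [if_neg (hne '(' (by rw [h]; decide)), if_neg (hne ')' (by rw [h]; decide)),
                if_pos (by rw [htwo, hA.1, h, hesc, hA.2]; simp), ihnext]
              simp
            · rw [if_neg (hne '(' (by rw [h]; decide)), if_neg (hne ')' (by rw [h]; decide)),
                if_neg (hne '[' (by rw [h]; decide)),
                if_pos (by rw [htwo, hA.1, h, hesc, hA.2]; simp), ihnext]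
              simp
          · -- an unescaped backslash not followed by a delimiter: A appends it, pos + 1
            rw [if_neg hb2]
            rw [if_neg (hne '(' (fun h => hb1 (Or.inl h))),
              if_neg (hne ')' (fun h => hb1 (Or.inr h))),
              if_neg (hne '[' (fun h => hb2 (Or.inl h))),
              if_neg (hne ']' (fun h => hb2 (Or.inr h)))]
            have ihnext := ih cs (pos + 1) (acc ++ [cs.getD pos ' ']) true (by omega)
              (by
                show true = (decide (0 < pos + 1) && (cs.getD pos ' ' == '\\'))
                rw [hA.1]; simp)
            rw [ihnext, hdrop1]
            simp
      · -- not an unescaped backslash at pos: A appends content[pos], pos + 1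
        rw [if_neg hA]
        have hfail : ∀ d : Char,
            ¬ (((cs.drop pos).take 2 = ['\\', d] &&
              !(decide (0 < pos) && (cs.getD (pos - 1) ' ' == '\\'))) = true) := by
          intro d hc
          rw [htwo, hesc] at hc
          simp only [Bool.and_eq_true, decide_eq_true_eq, List.cons.injEq,
            Bool.not_eq_true'] at hc
          exact hA ⟨hc.1.1, hc.2⟩
        rw [if_neg (hfail '('), if_neg (hfail ')'), if_neg (hfail '['), if_neg (hfail ']')]
        have ihnext := ih cs (pos + 1) (acc ++ [cs.getD pos ' ']) (cs.getD pos ' ' == '\\')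
          (by omega) (by simp)
        rw [ihnext, hdrop1]
        simp
    · -- loop exit: at most one character left
      rw [dif_neg hlt]
      by_cases hp : pos < cs.length
      · have hdrop : cs.drop pos = [cs.getD pos ' '] := by
          rw [List.drop_eq_getElem_cons hp]
          have hnil : cs.drop (pos + 1) = [] := List.drop_eq_nil_of_le (by omega)
          simp [hnil, List.getD, hp]
        rw [if_pos hp, hdrop]
        simp
      · rw [if_neg hp, List.drop_eq_nil_of_le (by omega)]
        simp

-- ===== VERDICT (by name: the statement is the Claim_ definition above) =====
theorem removeBadMath_spec : Claim_equal_removeBadMath := by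
  intro content _
  unfold Spec_removeBadMath removeBadMath removeBadMath_alt
  rw [altGo_eq_gScan]
  rw [goA_eq_gScan (content.toList.length) content.toList 0 [] false (by omega) (by simp)]
  simp
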